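-- pv_equiv track=rewrite | github.com/sdrdwy/OTTO | ai-town-new/agents/student_agent.py | _determine_study_activity
-- ===== SOURCE A (Python) =====
-- from typing import List, Dict, Any
--
-- def _determine_study_activity(date: str, period: str, previous_memories: List[Dict]) -> str:
--     """Determine what study activity to do based on learning goals and memories"""
--     # Check previous memories to see what needs reinforcement
--     recent_topics = []
--     for memory in previous_memories[-5:]:  # Look at last 5 memories
--         if 'content' in memory and ('topic' in memory['content'] or 'math' in memory['content'].lower()):
--             recent_topics.append(memory['content'])
--
--     if recent_topics:
--         # Focus on reinforcing recent topics
--         return f"review: {recent_topics[-1][:50]}"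
--     else:
--         # Default to general study
--         return "independent study"
-- ===== SOURCE B (Python) =====
-- def _determine_study_activity(date: str, period: str, previous_memories) -> str:
--     """Determine what study activity to do based on learning goals and memories"""
--     # Early-exit reverse scan over the last 5 memories: the first match from the
--     # back is exactly A's last accumulated topic; no intermediate list is kept.
--     for memory in reversed(previous_memories[-5:]):
--         if 'content' in memory and ('topic' in memory['content'] or 'math' in memory['content'].lower()):
--             return f"review: {memory['content'][:50]}"
--     return "independent study"
-- ===== Notes on version B (the rewrite author's own statement) =====
-- stated objective: simpler
-- what changed: Replaces accumulate-all-matching-topics-then-take-last with an early-exit reverse scan over the last five memories that returns on the first match and keeps no intermediate list.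
import Mathlib
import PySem

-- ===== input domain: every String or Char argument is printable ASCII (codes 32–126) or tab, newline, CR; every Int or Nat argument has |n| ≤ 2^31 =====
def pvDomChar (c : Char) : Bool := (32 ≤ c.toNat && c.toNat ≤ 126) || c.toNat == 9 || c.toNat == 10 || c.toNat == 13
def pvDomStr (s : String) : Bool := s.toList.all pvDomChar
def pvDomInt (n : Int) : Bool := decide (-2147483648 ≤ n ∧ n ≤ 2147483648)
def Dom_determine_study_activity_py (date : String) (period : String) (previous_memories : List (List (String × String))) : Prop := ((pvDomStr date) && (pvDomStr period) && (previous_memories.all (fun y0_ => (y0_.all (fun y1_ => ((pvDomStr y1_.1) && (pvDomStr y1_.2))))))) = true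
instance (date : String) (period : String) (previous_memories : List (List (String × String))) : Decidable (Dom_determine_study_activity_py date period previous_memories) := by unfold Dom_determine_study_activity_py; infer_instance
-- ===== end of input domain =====

-- B replaces A's accumulate-all-matching-topics-then-take-last with an early-exit
-- reverse scan over the last five memories (objective: simpler).

-- ===== PORT A =====
def determine_study_activity_py (date : String) (period : String) (previous_memories : List (List (String × String))) : String :=
  -- recent_topics = []; for memory in previous_memories[-5:]: …append…
  let recent_topics : List String :=
    (PySem.List.slice previous_memories (some (-5)) none).foldl
      (fun acc memory =>
        match (PySem.Dict.mk memory).get? "content" with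
        | some c =>
          if PySem.Str.isIn "topic" c || PySem.Str.isIn "math" (PySem.Str.lower c)
          then acc ++ [c] else acc
        | none => acc) []
  if recent_topics ≠ [] then
    "review: " ++ PySem.Str.slice (PySem.List.pyGetD recent_topics (-1) "") none (some 50)
  else
    "independent study"

-- ===== PORT B =====
def dsaReverseScan : List (List (String × String)) → String
  | [] => "independent study"
  | memory :: rest =>
    match (PySem.Dict.mk memory).get? "content" with
    | some c =>
      if PySem.Str.isIn "topic" c || PySem.Str.isIn "math" (PySem.Str.lower c)
      then "review: " ++ PySem.Str.slice c none (some 50)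
      else dsaReverseScan rest
    | none => dsaReverseScan rest

def determine_study_activity_py_alt (date : String) (period : String) (previous_memories : List (List (String × String))) : String :=
  dsaReverseScan (PySem.List.slice previous_memories (some (-5)) none).reverse

-- ===== PRECONDITION & SPEC =====
def Spec_determine_study_activity_py (date : String) (period : String) (previous_memories : List (List (String × String))) (out : String) : Prop := out = determine_study_activity_py_alt date period previous_memories
instance (date : String) (period : String) (previous_memories : List (List (String × String))) (out : String) : Decidable (Spec_determine_study_activity_py date period previous_memories out) := by unfold Spec_determine_study_activity_py; infer_instance

-- ===== CLAIM (what is proved, stated in full; the proofs are below) =====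
def Claim_equal_determine_study_activity_py : Prop := ∀ (date : String) (period : String) (previous_memories : List (List (String × String))), Dom_determine_study_activity_py date period previous_memories → Spec_determine_study_activity_py date period previous_memories (determine_study_activity_py date period previous_memories)

-- ===== LEMMAS AND PROOFS =====

-- xs[-1] of a list ending in c is c
theorem dsa_pyGetD_concat_neg_one (xs : List String) (c d : String) :
    PySem.List.pyGetD (xs ++ [c]) (-1) d = c := by
  simp [PySem.List.pyGetD, PySem.List.pyGet?, PySem.List.pyIdx?]

-- core: A's body applied to any window l equals B's reverse scan of l
theorem dsa_core (l : List (List (String × String))) :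
    (let recent_topics : List String :=
      l.foldl
        (fun acc memory =>
          match (PySem.Dict.mk memory).get? "content" with
          | some c =>
            if PySem.Str.isIn "topic" c || PySem.Str.isIn "math" (PySem.Str.lower c)
            then acc ++ [c] else acc
          | none => acc) []
     if recent_topics ≠ [] then
       "review: " ++ PySem.Str.slice (PySem.List.pyGetD recent_topics (-1) "") none (some 50)
     else
       "independent study") = dsaReverseScan l.reverse := by
  induction l using List.reverseRecOn with
  | nil => simp [dsaReverseScan]
  | append_singleton xs m ih =>
    rw [List.foldl_append, List.reverse_append]
    simp only [List.foldl_cons, List.foldl_nil, List.reverse_singleton, List.singleton_append,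
      dsaReverseScan]
    cases h : (PySem.Dict.mk m).get? "content" with
    | none => exact ih
    | some c =>
      cases hb : (PySem.Str.isIn "topic" c || PySem.Str.isIn "math" (PySem.Str.lower c)) with
      | false => simp only [hb, Bool.false_eq_true, if_false]; exact ih
      | true =>
        simp only [hb, if_true]
        rw [if_pos (by simp), dsa_pyGetD_concat_neg_one]

-- ===== VERDICT (by name: the statement is the Claim_ definition above) =====
theorem determine_study_activity_py_spec : Claim_equal_determine_study_activity_py := by
  intro date period pm _
  unfold Spec_determine_study_activity_py determine_study_activity_py determine_study_activity_py_alt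
  exact dsa_core (PySem.List.slice pm (some (-5)) none)
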